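-- pv_equiv track=rewrite | github.com/naeunwoo091116-crypto/digtaltiwn | src/mattersim_dt/builder/ternary_mixer.py | generate_composition_ratios
-- ===== SOURCE A (Python) =====
-- def generate_composition_ratios(total_atoms_range=None) -> list:
--     """
--     균등 분할 방식으로 3원소 조성 생성
--
--     Args:
--         total_atoms_range: 정수 합의 범위 리스트 (예: [3,4,5,6])
--                           None이면 [3,4,5,6] 사용
--
--     Returns:
--         [(a, b, c), ...] 형태의 정수 비율 튜플 리스트
--         예: [(1,1,1), (2,1,1), (1,2,1), (1,1,2), ...]
--     """
--     if total_atoms_range is None: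
--         total_atoms_range = [3, 4, 5, 6]
--
--     compositions = []
--
--     for total in total_atoms_range:
--         # 3개 원소에 total을 분배하는 모든 조합 생성
--         for a in range(1, total - 1):
--             for b in range(1, total - a):
--                 c = total - a - b
--                 if c >= 1:
--                     compositions.append((a, b, c))
--
--     return compositions
-- ===== SOURCE B (Python) =====
-- def compose(n, parts):
--     """All compositions of n into `parts` positive integer parts, lexicographic in the leading element."""
--     if parts == 1:
--         return [(n,)] if n >= 1 else []
--     if parts == 2:
--         return [(b, n - b) for b in range(1, n)]
--     return [(a,) + rest for a in range(1, n) for rest in compose(n - a, parts - 1)]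
--
--
-- def generate_composition_ratios(total_atoms_range=None) -> list:
--     if total_atoms_range is None:
--         total_atoms_range = [3, 4, 5, 6]
--     compositions = []
--     for total in total_atoms_range:
--         compositions.extend(compose(total, 3))
--     return compositions
-- ===== Notes on version B (the rewrite author's own statement) =====
-- stated objective: alternative
-- what changed: Replaces the three hard-coded nested loops with a recursive helper compose(n, parts) that builds positive compositions of n into `parts` parts (direct base cases for 1 and 2 parts, prepend-first-element recursion otherwise), called with parts=3 per total.
import Mathlib
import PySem

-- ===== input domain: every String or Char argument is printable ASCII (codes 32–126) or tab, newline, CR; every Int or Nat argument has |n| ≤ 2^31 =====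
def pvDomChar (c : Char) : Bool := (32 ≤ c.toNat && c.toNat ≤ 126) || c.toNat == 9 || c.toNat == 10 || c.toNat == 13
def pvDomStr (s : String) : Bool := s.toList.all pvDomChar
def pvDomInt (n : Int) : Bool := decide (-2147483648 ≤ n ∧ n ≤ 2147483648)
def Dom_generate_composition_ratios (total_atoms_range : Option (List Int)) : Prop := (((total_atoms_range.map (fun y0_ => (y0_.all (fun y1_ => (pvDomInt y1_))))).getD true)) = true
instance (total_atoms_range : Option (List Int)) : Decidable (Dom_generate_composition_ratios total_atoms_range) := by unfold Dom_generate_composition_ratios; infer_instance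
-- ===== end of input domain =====

-- B replaces A's three hard-coded nested loops with a recursive compositions generator (alternative decomposition, same cost).

-- ===== PORT A =====
def generate_composition_ratios (total_atoms_range : Option (List Int)) : List (Int × Int × Int) :=
  let totals := total_atoms_range.getD [3, 4, 5, 6]
  totals.foldl (fun compositions total =>
    (PySem.List.pyRange 1 (total - 1) 1).foldl (fun compositions a =>
      (PySem.List.pyRange 1 (total - a) 1).foldl (fun compositions b =>
        let c := total - a - b
        if c ≥ 1 then compositions ++ [(a, b, c)] else compositions) compositions) compositions) []

-- ===== PORT B =====
-- compositions of n into `parts` positive parts, as length-`parts` lists (Python's variable-length tuples).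
-- The `0` case is unreachable: B only ever calls compose with parts ≥ 1.
def pvCompose : Int → Nat → List (List Int)
  | _, 0 => []
  | n, 1 => if n ≥ 1 then [[n]] else []
  | n, 2 => (PySem.List.pyRange 1 n 1).map (fun b => [b, n - b])
  | n, (p + 3) => (PySem.List.pyRange 1 n 1).flatMap (fun a => (pvCompose (n - a) (p + 2)).map (fun rest => a :: rest))

-- reads a length-3 tuple (modelled as List Int) as a triple; the default is never hit (compose _ 3 yields length-3 lists).
def pvTriple : List Int → Int × Int × Int
  | [a, b, c] => (a, b, c)
  | _ => (0, 0, 0)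

def generate_composition_ratios_alt (total_atoms_range : Option (List Int)) : List (Int × Int × Int) :=
  let totals := total_atoms_range.getD [3, 4, 5, 6]
  totals.foldl (fun compositions total => compositions ++ (pvCompose total 3).map pvTriple) []

-- ===== PRECONDITION & SPEC =====
def Spec_generate_composition_ratios (total_atoms_range : Option (List Int)) (out : List (Int × Int × Int)) : Prop := out = generate_composition_ratios_alt total_atoms_range
instance (total_atoms_range : Option (List Int)) (out : List (Int × Int × Int)) : Decidable (Spec_generate_composition_ratios total_atoms_range out) := by unfold Spec_generate_composition_ratios; infer_instance

-- ===== CLAIM (what is proved, stated in full; the proofs are below) =====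
def Claim_equal_generate_composition_ratios : Prop := ∀ (total_atoms_range : Option (List Int)), Dom_generate_composition_ratios total_atoms_range → Spec_generate_composition_ratios total_atoms_range (generate_composition_ratios total_atoms_range)

-- ===== LEMMAS AND PROOFS =====

-- A's innermost b-loop: the guard c ≥ 1 always holds on the b-range, so it is a plain map.
theorem pvInnerB (t a : Int) (acc : List (Int × Int × Int)) :
    (PySem.List.pyRange 1 (t - a) 1).foldl (fun compositions b =>
        let c := t - a - b
        if c ≥ 1 then compositions ++ [(a, b, c)] else compositions) acc
      = acc ++ (PySem.List.pyRange 1 (t - a) 1).map (fun b => (a, b, t - a - b)) := by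
  rw [PySem.List.foldl_append_ite]
  congr 1
  rw [List.filter_eq_self.mpr]
  intro b hb
  rw [PySem.List.mem_pyRange_one] at hb
  simp only [ge_iff_le, decide_eq_true_eq]
  omega

-- A's contribution for one total, as a flatMap.
theorem pvAtotal (t : Int) (acc : List (Int × Int × Int)) :
    (PySem.List.pyRange 1 (t - 1) 1).foldl (fun compositions a =>
      (PySem.List.pyRange 1 (t - a) 1).foldl (fun compositions b =>
        let c := t - a - b
        if c ≥ 1 then compositions ++ [(a, b, c)] else compositions) compositions) acc
      = acc ++ (PySem.List.pyRange 1 (t - 1) 1).flatMap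
          (fun a => (PySem.List.pyRange 1 (t - a) 1).map (fun b => (a, b, t - a - b))) := by
  simp only [pvInnerB]
  exact PySem.List.foldl_append_eq_flatMap _ _ _

-- compose into 2 parts is a map over the first element.
theorem pvCompose_two (m : Int) :
    pvCompose m 2 = (PySem.List.pyRange 1 m 1).map (fun b => [b, m - b]) := rfl

-- B's contribution for one total equals A's flatMap form.
theorem pvBtotal (t : Int) :
    (pvCompose t 3).map pvTriple
      = (PySem.List.pyRange 1 (t - 1) 1).flatMap
          (fun a => (PySem.List.pyRange 1 (t - a) 1).map (fun b => (a, b, t - a - b))) := by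
  show ((PySem.List.pyRange 1 t 1).flatMap (fun a => (pvCompose (t - a) 2).map (fun rest => a :: rest))).map pvTriple = _
  simp only [pvCompose_two, List.map_flatMap, List.map_map]
  have hrange : PySem.List.pyRange 1 t 1
      = PySem.List.pyRange 1 (t - 1) 1 ++ (if 1 ≤ t - 1 then [t - 1] else []) := by
    by_cases h : 1 ≤ t - 1
    · rw [if_pos h]
      have := PySem.List.pyRange_one_succ_right (a := 1) (b := t - 1) (by omega)
      simpa [show t - 1 + 1 = t by ring] using this
    · rw [if_neg h, PySem.List.pyRange_one_eq_nil (by omega), PySem.List.pyRange_one_eq_nil (by omega)]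
      simp
  rw [hrange, List.flatMap_append]
  have hlast : ((if 1 ≤ t - 1 then [t - 1] else []) : List Int).flatMap
      (fun a => (PySem.List.pyRange 1 (t - a) 1).map
        (pvTriple ∘ (fun rest => a :: rest) ∘ fun b => [b, t - a - b])) = [] := by
    by_cases h : 1 ≤ t - 1
    · rw [if_pos h]
      simp
    · rw [if_neg h]; rfl
  rw [hlast, List.append_nil]
  rfl

-- ===== VERDICT (by name: the statement is the Claim_ definition above) =====
theorem generate_composition_ratios_spec : Claim_equal_generate_composition_ratios := by
  intro total_atoms_range _
  unfold Spec_generate_composition_ratios generate_composition_ratios generate_composition_ratios_alt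
  simp only [pvAtotal, pvBtotal]
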